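-- pv_equiv track=rewrite | github.com/kushalpokharel/cryptanalysis-504 | help.py | digram_
-- ===== SOURCE A (Python) =====
-- def digram_(s:str)->dict:
--     freq = {}
--     for i in range(len(s) - 1):
--         if s[i].isalpha() and s[i+1].isalpha():
--             pair = s[i:i+2]
--             freq[pair] = freq.get(pair, 0) + 1
--     sorted_items_asc = sorted(freq.items(), key=lambda item: item[1], reverse=True)
--     return dict(sorted_items_asc)
-- ===== SOURCE B (Python) =====
-- def digram_(s: str) -> dict:
--     freq = {}
--     for i in range(len(s) - 1):
--         if s[i].isalpha() and s[i+1].isalpha():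
--             pair = s[i:i+2]
--             freq[pair] = freq.get(pair, 0) + 1
--     maxc = 0
--     for c in freq.values():
--         if c > maxc:
--             maxc = c
--     out = {}
--     for c in range(maxc, 0, -1):
--         for pair, cnt in freq.items():
--             if cnt == c:
--                 out[pair] = cnt
--     return out
-- ===== Notes on version B (the rewrite author's own statement) =====
-- stated objective: alternative
-- what changed: The comparison sort (sorted by count, reverse=True) is replaced by a counting/bucket pass: B computes the maximum count with a running-max loop and emits the freq items by scanning counts from max down to 1, which reproduces the stable descending order without sorting.
import Mathlib
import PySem

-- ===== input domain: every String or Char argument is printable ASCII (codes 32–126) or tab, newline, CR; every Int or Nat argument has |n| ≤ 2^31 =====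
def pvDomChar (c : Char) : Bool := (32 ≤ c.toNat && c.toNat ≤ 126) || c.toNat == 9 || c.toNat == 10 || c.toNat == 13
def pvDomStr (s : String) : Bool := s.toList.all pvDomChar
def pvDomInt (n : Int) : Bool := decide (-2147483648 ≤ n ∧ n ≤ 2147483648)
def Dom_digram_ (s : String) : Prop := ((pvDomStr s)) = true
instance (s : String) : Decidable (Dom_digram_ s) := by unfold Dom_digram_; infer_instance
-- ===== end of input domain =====

-- B replaces the comparison sort (sorted by count, reverse=True) by a counting/bucket pass:
-- compute the maximum count with a running-max loop, then emit the freq items by scanning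
-- counts from max down to 1 (alternative decomposition; not claimed faster).

-- ===== PORT A =====
-- shared helper: the frequency-building first pass, which is literally the same Python
-- code in A and in B (both ports call it)
def pvFreq (cs : List Char) : PySem.Dict String Int :=
  (PySem.List.pyRange 0 ((cs.length : Int) - 1) 1).foldl
    (fun freq i =>
      if PySem.Chars.isalpha (PySem.List.pyGetD cs i ' ')
          && PySem.Chars.isalpha (PySem.List.pyGetD cs (i + 1) ' ') then
        let pair := String.mk (PySem.List.slice cs (some i) (some (i + 2)))
        freq.insert pair (freq.getD pair 0 + 1)
      else freq)
    PySem.Dict.empty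

def digram_ (s : String) : List (String × Int) :=
  let freq := pvFreq s.toList
  let sorted_items_asc := PySem.List.sorted freq.items (fun item => item.2) true
  (PySem.Dict.ofList sorted_items_asc).items

-- ===== PORT B =====
def digram__alt (s : String) : List (String × Int) :=
  let freq := pvFreq s.toList
  let maxc := freq.values.foldl (fun maxc c => if c > maxc then c else maxc) 0
  let out := (PySem.List.pyRange maxc 0 (-1)).foldl
    (fun out c => freq.items.foldl
      (fun out p => if p.2 == c then out.insert p.1 p.2 else out) out)
    PySem.Dict.empty
  out.items

-- ===== PRECONDITION & SPEC =====
def Spec_digram_ (s : String) (out : List (String × Int)) : Prop := out = digram__alt s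
instance (s : String) (out : List (String × Int)) : Decidable (Spec_digram_ s out) := by unfold Spec_digram_; infer_instance

-- ===== CLAIM (what is proved, stated in full; the proofs are below) =====
def Claim_equal_digram_ : Prop := ∀ (s : String), Dom_digram_ s → Spec_digram_ s (digram_ s)

-- ===== LEMMAS AND PROOFS =====

-- flatMap respects pointwise-equal-on-members functions
theorem pvFlatMapCongr {α β : Type} (l : List α) (f g : α → List β)
    (h : ∀ a ∈ l, f a = g a) : l.flatMap f = l.flatMap g := by
  induction l with
  | nil => rfl
  | cons a t ih =>
    simp only [List.flatMap_cons, h a (List.mem_cons_self), ih (fun a ha => h a (List.mem_cons_of_mem _ ha))]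

-- a foldl whose step preserves key-Nodup preserves it
theorem pvFoldlKeysNodup {β : Type} (g : PySem.Dict String Int → β → PySem.Dict String Int)
    (hg : ∀ d b, d.keys.Nodup → (g d b).keys.Nodup) :
    ∀ (l : List β) (d : PySem.Dict String Int), d.keys.Nodup → (l.foldl g d).keys.Nodup := by
  intro l
  induction l with
  | nil => intro d hd; exact hd
  | cons b t ih => intro d hd; exact ih (g d b) (hg d b hd)

theorem pvFreq_keys_nodup (cs : List Char) : (pvFreq cs).keys.Nodup := by
  unfold pvFreq
  apply pvFoldlKeysNodup
  · intro d i hd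
    dsimp only
    split
    · exact PySem.Dict.nodup_keys_insert _ _ _ hd
    · exact hd
  · exact PySem.Dict.nodup_keys_empty

-- a foldl whose step preserves an items-invariant preserves it
theorem pvFoldlItemsInv {β : Type} (g : PySem.Dict String Int → β → PySem.Dict String Int)
    (P : String × Int → Prop) (hg : ∀ d b, (∀ p ∈ d.items, P p) → ∀ p ∈ (g d b).items, P p) :
    ∀ (l : List β) (d : PySem.Dict String Int),
      (∀ p ∈ d.items, P p) → ∀ p ∈ (l.foldl g d).items, P p := by
  intro l
  induction l with
  | nil => intro d hd; exact hd
  | cons b t ih => intro d hd; exact ih (g d b) (hg d b hd)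

theorem pvFreq_pos (cs : List Char) : ∀ p ∈ (pvFreq cs).items, 1 ≤ p.2 := by
  unfold pvFreq
  apply pvFoldlItemsInv _ (fun p => 1 ≤ p.2)
  · intro d i hd
    dsimp only
    split
    · intro p hp
      rw [PySem.Dict.mem_items_insert] at hp
      rcases hp with hp | hp
      · subst hp
        dsimp only
        have h0 : (0 : Int) ≤ d.getD (String.mk (PySem.List.slice cs (some i) (some (i + 2)))) 0 := by
          rw [PySem.Dict.getD_eq_get?_getD]
          cases hq : d.get? (String.mk (PySem.List.slice cs (some i) (some (i + 2)))) with
          | none => simp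
          | some v =>
            have := hd _ (PySem.Dict.mem_items_of_get?_eq_some d hq)
            simpa using le_trans (by norm_num) this
        omega
      · exact hd p hp.1
    · exact hd
  · intro p hp
    simp [PySem.Dict.empty] at hp

-- the running-max body is max
theorem pvMaxBody : (fun (maxc c : Int) => if c > maxc then c else maxc) = max := by
  funext m c
  by_cases h : c > m
  · simp [h, max_eq_right h.le]
  · simp [h, max_eq_left (not_lt.mp h)]

-- insertBy goes in front when everything is 'before'
theorem pvInsertByAll {α : Type} (before : α → α → Bool) (x : α) (l : List α)
    (h : ∀ y ∈ l, before x y = true) : PySem.List.insertBy before x l = x :: l := by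
  cases l with
  | nil => rfl
  | cons y ys => simp [PySem.List.insertBy, h y (List.mem_cons_self)]

-- insertBy skips a prefix on which 'before' never fires
theorem pvInsertBySkip {α : Type} (before : α → α → Bool) (x : α) (l1 l2 : List α)
    (h : ∀ y ∈ l1, before x y = false) :
    PySem.List.insertBy before x (l1 ++ l2) = l1 ++ PySem.List.insertBy before x l2 := by
  induction l1 with
  | nil => rfl
  | cons y t ih =>
    simp [PySem.List.insertBy, h y (List.mem_cons_self),
      ih (fun z hz => h z (List.mem_cons_of_mem _ hz))]

-- inserting one element into the descending bucket concatenation appends it to its bucket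
theorem pvInsertFlatMap (n : Nat) (x : String × Int) (ys : List (String × Int))
    (hx1 : 1 ≤ x.2) (hx2 : x.2 ≤ (n : Int)) :
    PySem.List.insertBy (fun a b => decide (b.2 < a.2)) x
        ((PySem.List.pyRange (n : Int) 0 (-1)).flatMap (fun c => ys.filter (fun p => p.2 == c)))
      = (PySem.List.pyRange (n : Int) 0 (-1)).flatMap
          (fun c => (ys ++ [x]).filter (fun p => p.2 == c)) := by
  have hsplit : ∀ c : Int, (ys ++ [x]).filter (fun p => p.2 == c)
      = ys.filter (fun p => p.2 == c) ++ if x.2 = c then [x] else [] := by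
    intro c
    rw [List.filter_append, List.filter_singleton]
    by_cases hc : x.2 = c
    · simp [hc]
    · simp [hc, beq_eq_false_iff_ne.mpr hc]
  induction n with
  | zero => simp at hx2; omega
  | succ m ih =>
    have hc1 : ((m + 1 : Nat) : Int) = (m : Int) + 1 := by push_cast; ring
    have hc2 : ((m : Int) + 1) - 1 = (m : Int) := by ring
    rw [hc1, PySem.List.pyRange_neg_one_cons (by positivity), hc2,
        List.flatMap_cons, List.flatMap_cons]
    rw [hc1] at hx2
    by_cases hx : x.2 = (m : Int) + 1
    · rw [pvInsertBySkip _ _ _ _ (by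
        intro y hy
        rw [List.mem_filter] at hy
        have : y.2 = (m : Int) + 1 := by simpa using hy.2
        simp [this, hx])]
      rw [pvInsertByAll _ _ _ (by
        intro y hy
        rw [List.mem_flatMap] at hy
        rcases hy with ⟨c, hc, hyc⟩
        rw [PySem.List.mem_pyRange_neg_one] at hc
        rw [List.mem_filter] at hyc
        have : y.2 = c := by simpa using hyc.2
        simp only [decide_eq_true_eq]
        omega)]
      have hlow : (PySem.List.pyRange (m : Int) 0 (-1)).flatMap
            (fun c => (ys ++ [x]).filter (fun p => p.2 == c))
          = (PySem.List.pyRange (m : Int) 0 (-1)).flatMap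
            (fun c => ys.filter (fun p => p.2 == c)) := by
        apply pvFlatMapCongr
        intro c hc
        rw [PySem.List.mem_pyRange_neg_one] at hc
        rw [hsplit, if_neg (by omega)]
        simp
      rw [hsplit, if_pos hx, hlow]
      simp
    · have hx2' : x.2 ≤ (m : Int) := by omega
      rw [pvInsertBySkip _ _ _ _ (by
        intro y hy
        rw [List.mem_filter] at hy
        have : y.2 = (m : Int) + 1 := by simpa using hy.2
        simp only [decide_eq_false_iff_not, not_lt]
        omega)]
      rw [hsplit, if_neg hx, List.append_nil, ih hx2']

-- the stable reverse sort by count is the descending bucket concatenation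
theorem pvBucketSorted (n : Nat) (l : List (String × Int))
    (h : ∀ p ∈ l, 1 ≤ p.2 ∧ p.2 ≤ (n : Int)) :
    PySem.List.sorted l (fun p => p.2) true
      = (PySem.List.pyRange (n : Int) 0 (-1)).flatMap
          (fun c => l.filter (fun p => p.2 == c)) := by
  induction l using List.reverseRecOn with
  | nil =>
    rw [(PySem.List.sorted_eq_nil_iff ([] : List (String × Int)) (fun p => p.2) true).mpr rfl]
    simp
  | append_singleton ys x ih =>
    have hys : ∀ p ∈ ys, 1 ≤ p.2 ∧ p.2 ≤ (n : Int) := fun p hp => h p (by simp [hp])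
    have hx := h x (by simp)
    rw [PySem.List.sorted_rev_eq_foldl_insertBy, List.foldl_append, List.foldl_cons,
        List.foldl_nil, ← PySem.List.sorted_rev_eq_foldl_insertBy, ih hys]
    exact pvInsertFlatMap n x ys hx.1 hx.2

-- B's inner loop over the items appends the c-bucket to the output dict
theorem pvInnerItems (c : Int) (l : List (String × Int)) :
    ∀ (d : PySem.Dict String Int),
      (l.map Prod.fst).Nodup → (∀ p ∈ l, p.2 = c → d.contains p.1 = false) →
      (l.foldl (fun out p => if p.2 == c then out.insert p.1 p.2 else out) d).items
        = d.items ++ l.filter (fun p => p.2 == c) := by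
  induction l with
  | nil => intro d _ _; simp
  | cons p t ih =>
    intro d hnd hfresh
    simp only [List.map_cons, List.nodup_cons] at hnd
    simp only [List.foldl_cons]
    by_cases hp : p.2 = c
    · rw [if_pos (by simpa using hp)]
      have hconsq : ∀ q ∈ t, q.2 = c → (d.insert p.1 p.2).contains q.1 = false := by
        intro q hq hqc
        rw [PySem.Dict.contains_insert]
        have hne : q.1 ≠ p.1 := fun he => hnd.1 (he ▸ List.mem_map_of_mem hq)
        simp [hne, hfresh q (List.mem_cons_of_mem _ hq) hqc]
      rw [ih (d.insert p.1 p.2) hnd.2 hconsq,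
          PySem.Dict.items_insert_of_not_contains d p.2
            (hfresh p List.mem_cons_self hp)]
      rw [List.filter_cons, if_pos (by simpa using hp)]
      simp
    · rw [if_neg (by simpa using hp), List.filter_cons, if_neg (by simpa using hp)]
      exact ih d hnd.2 (fun q hq hqc => hfresh q (List.mem_cons_of_mem _ hq) hqc)

-- B's outer countdown loop emits all buckets in descending order
theorem pvOuterItems (l : List (String × Int)) (hnd : (l.map Prod.fst).Nodup) :
    ∀ (n : Nat) (d : PySem.Dict String Int),
      (∀ p ∈ l, p.2 ≤ (n : Int) → d.contains p.1 = false) →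
      ((PySem.List.pyRange (n : Int) 0 (-1)).foldl
          (fun out c => l.foldl (fun out p => if p.2 == c then out.insert p.1 p.2 else out) out)
          d).items
        = d.items ++ (PySem.List.pyRange (n : Int) 0 (-1)).flatMap
            (fun c => l.filter (fun p => p.2 == c)) := by
  intro n
  induction n with
  | zero =>
    intro d _
    rw [PySem.List.pyRange_neg_one_eq_nil (by norm_num)]
    simp
  | succ m ih =>
    intro d hfresh
    have hc1 : ((m + 1 : Nat) : Int) = (m : Int) + 1 := by push_cast; ring
    have hc2 : ((m : Int) + 1) - 1 = (m : Int) := by ring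
    rw [hc1] at hfresh ⊢
    rw [PySem.List.pyRange_neg_one_cons (by positivity), hc2, List.foldl_cons, List.flatMap_cons]
    have hdi := pvInnerItems ((m : Int) + 1) l d hnd
      (fun p hp hpc => hfresh p hp (le_of_eq hpc))
    have hfresh' : ∀ p ∈ l, p.2 ≤ (m : Int) →
        (l.foldl (fun out p => if p.2 == ((m : Int) + 1) then out.insert p.1 p.2 else out) d).contains p.1 = false := by
      intro p hp hple
      by_contra hb
      rw [Bool.not_eq_false, PySem.Dict.contains_iff_mem_keys, PySem.Dict.keys, hdi,
          List.map_append, List.mem_append] at hb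
      rcases hb with hb | hb
      · have : d.contains p.1 = true := by
          rw [PySem.Dict.contains_iff_mem_keys]
          exact hb
        rw [hfresh p hp (by omega)] at this
        exact Bool.false_ne_true this
      · rw [List.mem_map] at hb
        rcases hb with ⟨q, hq, hq1⟩
        rw [List.mem_filter] at hq
        have hq2 : q.2 = (m : Int) + 1 := by simpa using hq.2
        have heq : q = p := List.inj_on_of_nodup_map hnd hq.1 hp hq1
        rw [heq] at hq2
        omega
    rw [ih _ hfresh', hdi, List.append_assoc]

-- dict(pairs) over distinct keys reproduces the pairs
theorem pvItemsOfList (ps : List (String × Int)) (h : (ps.map Prod.fst).Nodup) :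
    (PySem.Dict.ofList ps).items = ps := by
  have := PySem.Dict.items_foldl_insert_fresh ps Prod.fst Prod.snd PySem.Dict.empty
    (fun a _ => PySem.Dict.contains_empty a.1) h
  simpa using this

-- ===== VERDICT (by name: the statement is the Claim_ definition above) =====
theorem digram__spec : Claim_equal_digram_ := by
  intro s _
  unfold Spec_digram_
  simp only [digram_, digram__alt]
  set freq := pvFreq s.toList with hfreq
  have hnd : (freq.items.map Prod.fst).Nodup := pvFreq_keys_nodup s.toList
  have hpos := pvFreq_pos s.toList
  set M := freq.values.foldl (fun maxc c => if c > maxc then c else maxc) 0 with hM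
  have hMeq : M = freq.values.foldl max 0 := by rw [hM, pvMaxBody]
  have hM0 : (0 : Int) ≤ M := hMeq ▸ (PySem.List.le_foldl_max freq.values 0).1
  have hMub : ∀ p ∈ freq.items, p.2 ≤ M := by
    intro p hp
    have hv : p.2 ∈ freq.values := by
      rw [PySem.Dict.values, List.mem_map]
      exact ⟨p, hp, rfl⟩
    rw [hMeq]
    exact (PySem.List.le_foldl_max freq.values 0).2 _ hv
  have hcast : ((M.toNat : Nat) : Int) = M := Int.toNat_of_nonneg hM0
  have hsortnd : ((PySem.List.sorted freq.items (fun item => item.2) true).map Prod.fst).Nodup :=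
    (List.Perm.nodup_iff ((PySem.List.sorted_perm freq.items (fun item => item.2) true).map Prod.fst)).mpr hnd
  rw [pvItemsOfList _ hsortnd,
      pvBucketSorted M.toNat freq.items
        (fun p hp => ⟨hpos p hp, hcast ▸ hMub p hp⟩)]
  have hB := pvOuterItems freq.items hnd M.toNat PySem.Dict.empty
    (fun p _ _ => PySem.Dict.contains_empty p.1)
  rw [hcast] at hB
  rw [hB, ← hcast]
  simp [PySem.Dict.empty]
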